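-- pv_equiv track=rewrite | github.com/HyeM207/Algorithm | Implementation/[Prg] 옹알이(2).py | check_combi
-- ===== SOURCE A (Python) =====
-- def check_combi(combi):
--     start = 0
--     finish = 1
--     prev = ""
--     while start < len(combi) :
--         if prev!= combi[start:start+2] and combi[start:start+2] in ("ye", "ma") :
--             prev = combi[start:start+2]
--             start += 2
--         elif prev!= combi[start:start+3] and combi[start:start+3] in ("aya", "woo") :
--             prev = combi[start:start+3]
--             start += 3
--         else :
--             return False
--     return True
-- ===== SOURCE B (Python) =====
-- def check_combi(combi):
--     # Pass 1: greedy unambiguous tokenization; Pass 2: no two consecutive tokens equal.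
--     tokens = []
--     i = 0
--     n = len(combi)
--     while i < n:
--         if combi[i:i+2] in ("ye", "ma"):
--             tokens.append(combi[i:i+2])
--             i += 2
--         elif combi[i:i+3] in ("aya", "woo"):
--             tokens.append(combi[i:i+3])
--             i += 3
--         else:
--             return False
--     return all(tokens[j] != tokens[j-1] for j in range(1, len(tokens)))
-- ===== Notes on version B (the rewrite author's own statement) =====
-- stated objective: alternative
-- what changed: B splits A's single stateful scan into two passes: an unambiguous greedy tokenizer that builds the token list (no prev state), then a separate adjacency pass checking no two consecutive tokens are equal.
import Mathlib
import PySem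

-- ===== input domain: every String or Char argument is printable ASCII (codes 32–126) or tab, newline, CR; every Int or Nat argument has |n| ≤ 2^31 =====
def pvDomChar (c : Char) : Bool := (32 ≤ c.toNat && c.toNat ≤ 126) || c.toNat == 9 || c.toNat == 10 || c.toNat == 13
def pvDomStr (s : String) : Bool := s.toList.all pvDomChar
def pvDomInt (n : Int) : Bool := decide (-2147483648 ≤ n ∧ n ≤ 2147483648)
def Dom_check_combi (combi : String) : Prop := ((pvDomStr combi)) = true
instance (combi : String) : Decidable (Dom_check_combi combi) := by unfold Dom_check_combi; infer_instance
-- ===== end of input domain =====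

-- B replaces A's single stateful scan by two passes (tokenize, then check adjacent tokens distinct); alternative decomposition, same cost.

-- ===== PORT A =====
def pvTok2 (t : List Char) : Bool := t = ['y','e'] || t = ['m','a']
def pvTok3 (t : List Char) : Bool := t = ['a','y','a'] || t = ['w','o','o']

-- A's while loop: start index becomes the remaining suffix, prev carried along.
def pvGoA : List Char → List Char → Bool
  | [], _ => true
  | c :: rest, prev =>
    if prev ≠ (c :: rest).take 2 ∧ pvTok2 ((c :: rest).take 2) = true then
      pvGoA ((c :: rest).drop 2) ((c :: rest).take 2)
    else if prev ≠ (c :: rest).take 3 ∧ pvTok3 ((c :: rest).take 3) = true then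
      pvGoA ((c :: rest).drop 3) ((c :: rest).take 3)
    else false
termination_by cs _ => cs.length
decreasing_by all_goals (simp; try omega)

def check_combi (combi : String) : Bool := pvGoA combi.toList []

-- ===== PORT B =====
-- Pass 1: greedy tokenization (no prev state); none = tokenization failure.
def pvTokenize : List Char → Option (List (List Char))
  | [] => some []
  | c :: rest =>
    if pvTok2 ((c :: rest).take 2) = true then
      (pvTokenize ((c :: rest).drop 2)).map ((c :: rest).take 2 :: ·)
    else if pvTok3 ((c :: rest).take 3) = true then
      (pvTokenize ((c :: rest).drop 3)).map ((c :: rest).take 3 :: ·)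
    else none
termination_by cs => cs.length
decreasing_by all_goals (simp; try omega)

-- Pass 2: all(tokens[j] != tokens[j-1])
def pvAdjOK : List (List Char) → Bool
  | [] => true
  | [_] => true
  | a :: b :: rest => (decide (a ≠ b)) && pvAdjOK (b :: rest)

def check_combi_alt (combi : String) : Bool :=
  match pvTokenize combi.toList with
  | none => false
  | some ts => pvAdjOK ts

-- ===== PRECONDITION & SPEC =====
def Spec_check_combi (combi : String) (out : Bool) : Prop := out = check_combi_alt combi
instance (combi : String) (out : Bool) : Decidable (Spec_check_combi combi out) := by unfold Spec_check_combi; infer_instance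

-- ===== CLAIM (what is proved, stated in full; the proofs are below) =====
def Claim_equal_check_combi : Prop := ∀ (combi : String), Dom_check_combi combi → Spec_check_combi combi (check_combi combi)

-- ===== LEMMAS AND PROOFS =====

-- adjacency check seeded with the previous token
def pvAdjP : List Char → List (List Char) → Bool
  | _, [] => true
  | prev, t :: ts => (decide (prev ≠ t)) && pvAdjP t ts

lemma pvAdjOK_eq (b : List Char) (ts : List (List Char)) :
    pvAdjOK (b :: ts) = pvAdjP b ts := by
  induction ts generalizing b with
  | nil => simp [pvAdjOK, pvAdjP]
  | cons t ts ih => simp [pvAdjOK, pvAdjP, ih]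

lemma pvTok23 (c : Char) (rest : List Char)
    (h : pvTok2 ((c :: rest).take 2) = true) : pvTok3 ((c :: rest).take 3) = false := by
  cases rest with
  | nil => simp [pvTok2] at h
  | cons b r2 =>
    simp [pvTok2] at h
    rcases h with ⟨hc, hb⟩ | ⟨hc, hb⟩ <;> simp [pvTok3, hc]

lemma pvTok_ne_nil {t : List Char} (h : pvTok2 t = true ∨ pvTok3 t = true) : t ≠ [] := by
  rcases h with h | h <;> simp [pvTok2, pvTok3] at h <;>
    rcases h with h | h <;> subst h <;> simp

lemma pvTokenize_head_ne_nil (cs : List Char) (t : List Char) (ts : List (List Char))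
    (h : pvTokenize cs = some (t :: ts)) : t ≠ [] := by
  cases cs with
  | nil => simp [pvTokenize] at h
  | cons c rest =>
    unfold pvTokenize at h
    split_ifs at h with h2 h3
    · rcases Option.map_eq_some_iff.mp h with ⟨ts', _, h'⟩
      exact (List.cons.injEq .. ▸ h').1 ▸ pvTok_ne_nil (Or.inl h2)
    · rcases Option.map_eq_some_iff.mp h with ⟨ts', _, h'⟩
      exact (List.cons.injEq .. ▸ h').1 ▸ pvTok_ne_nil (Or.inr h3)

lemma pvMain (cs prev : List Char) :
    pvGoA cs prev = (pvTokenize cs).elim false (fun ts => pvAdjP prev ts) := by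
  induction cs, prev using pvGoA.induct with
  | case1 prev => simp [pvGoA, pvTokenize, pvAdjP]
  | case2 c rest prev h ih =>
    rw [pvGoA, pvTokenize, if_pos h, if_pos h.2, ih]
    cases htok : pvTokenize ((c :: rest).drop 2) with
    | none => rfl
    | some ts =>
      have h1' : ¬ prev = c :: List.take 1 rest := by simpa using h.1
      simp [pvAdjP, h1']
  | case3 c rest prev h1 h2 ih =>
    by_cases h2t : pvTok2 ((c :: rest).take 2) = true
    · rw [pvTok23 c rest h2t] at h2
      exact absurd h2.2 (by simp)
    · rw [pvGoA, pvTokenize, if_neg h1, if_pos h2, if_neg h2t, if_pos h2.2, ih]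
      cases htok : pvTokenize ((c :: rest).drop 3) with
      | none => rfl
      | some ts =>
        have h1' : ¬ prev = c :: List.take 2 rest := by simpa using h2.1
        simp [pvAdjP, h1']
  | case4 c rest prev h1 h2 =>
    rw [pvGoA, pvTokenize, if_neg h1, if_neg h2]
    by_cases h2t : pvTok2 ((c :: rest).take 2) = true
    · have hp : prev = (c :: rest).take 2 := by
        by_contra hne; exact h1 ⟨hne, h2t⟩
      rw [if_pos h2t]
      cases htok : pvTokenize ((c :: rest).drop 2) with
      | none => rfl
      | some ts => simp [pvAdjP, hp]
    · rw [if_neg h2t]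
      by_cases h3t : pvTok3 ((c :: rest).take 3) = true
      · have hp : prev = (c :: rest).take 3 := by
          by_contra hne; exact h2 ⟨hne, h3t⟩
        rw [if_pos h3t]
        cases htok : pvTokenize ((c :: rest).drop 3) with
        | none => rfl
        | some ts => simp [pvAdjP, hp]
      · rw [if_neg h3t]; rfl

-- ===== VERDICT (by name: the statement is the Claim_ definition above) =====
theorem check_combi_spec : Claim_equal_check_combi := by
  intro combi _
  unfold Spec_check_combi check_combi check_combi_alt
  rw [pvMain]
  cases htok : pvTokenize combi.toList with
  | none => simp
  | some ts =>
    cases ts with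
    | nil => simp [pvAdjP, pvAdjOK]
    | cons t ts' =>
      have hne : t ≠ [] := pvTokenize_head_ne_nil _ _ _ htok
      simp [pvAdjP, pvAdjOK_eq, Ne.symm hne]
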